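-- pv_equiv track=rewrite | github.com/fredyoung007/fredyoung007 | py/max.py | titleDict
-- ===== SOURCE A (Python) =====
-- def titleDict(song_list):
--     dict = {}
--     titles = []
--     artist = ""
--     for song in song_list:
--         if artist == song[1]:
--             titles.append(song[0])
--         else:
--             artist = song[1]
--             titles = [song[0]]
--
--         dict[artist] = titles
--
--     return dict
-- ===== SOURCE B (Python) =====
-- def titleDict(song_list):
--     d = {}
--     i = 0
--     n = len(song_list)
--     while i < n:
--         artist = song_list[i][1]
--         j = i
--         while j < n and song_list[j][1] == artist:
--             j += 1
--         d[artist] = [t for t, _ in song_list[i:j]]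
--         i = j
--     return d
-- ===== Notes on version B (the rewrite author's own statement) =====
-- stated objective: alternative
-- what changed: Replaced A's per-element state machine (running artist, mutable titles list, if/else per song) by a two-pointer scan that finds each maximal consecutive run of one artist and assigns its title slice to the dict in one step.
import Mathlib
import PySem

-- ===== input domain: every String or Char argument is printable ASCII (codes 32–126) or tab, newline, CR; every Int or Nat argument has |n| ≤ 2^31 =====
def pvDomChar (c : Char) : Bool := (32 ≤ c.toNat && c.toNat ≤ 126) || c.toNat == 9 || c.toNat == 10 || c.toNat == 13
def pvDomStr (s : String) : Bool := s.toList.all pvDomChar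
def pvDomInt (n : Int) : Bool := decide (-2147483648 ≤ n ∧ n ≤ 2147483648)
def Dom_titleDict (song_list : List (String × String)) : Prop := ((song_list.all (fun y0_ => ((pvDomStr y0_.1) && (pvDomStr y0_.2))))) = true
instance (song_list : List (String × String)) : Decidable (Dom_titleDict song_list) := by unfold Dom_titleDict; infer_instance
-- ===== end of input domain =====

-- B replaces A's per-element running-state loop by a two-pointer scan over maximal
-- consecutive runs of the same artist (objective: alternative; same cost).

-- ===== PORT A =====
-- A's for-loop: state (dict, titles, artist); each iteration appends or restarts titles,
-- then sets dict[artist] = titles.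
def titleDictLoop (d : PySem.Dict String (List String)) (titles : List String)
    (artist : String) : List (String × String) → PySem.Dict String (List String)
  | [] => d
  | song :: rest =>
    if artist == song.2 then
      titleDictLoop (d.insert artist (titles ++ [song.1])) (titles ++ [song.1]) artist rest
    else
      titleDictLoop (d.insert song.2 [song.1]) [song.1] song.2 rest

def titleDict (song_list : List (String × String)) : List (String × List String) :=
  (titleDictLoop PySem.Dict.empty [] "" song_list).items

-- ===== PORT B =====
-- inner while loop of Source B: collect the titles of the leading run of artist `a`,
-- returning (titles of the run, the rest of the list) — the two pointers i..j.
def spanArtist (a : String) : List (String × String) → List String × List (String × String)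
  | [] => ([], [])
  | (t, b) :: rest =>
    if b == a then
      let p := spanArtist a rest
      (t :: p.1, p.2)
    else ([], (t, b) :: rest)

theorem spanArtist_snd_length (a : String) (l : List (String × String)) :
    (spanArtist a l).2.length ≤ l.length := by
  induction l with
  | nil => simp [spanArtist]
  | cons hd tl ih =>
    obtain ⟨t, b⟩ := hd
    by_cases h : b == a <;> simp [spanArtist, h] <;> omega

-- outer while loop of Source B: one (artist, run-titles) pair per maximal run.
def groupRuns : List (String × String) → List (String × List String)
  | [] => []
  | (t, a) :: rest =>
    (a, t :: (spanArtist a rest).1) :: groupRuns (spanArtist a rest).2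
termination_by l => l.length
decreasing_by
  have := spanArtist_snd_length a rest
  simp; omega

def titleDict_alt (song_list : List (String × String)) : List (String × List String) :=
  ((groupRuns song_list).foldl (fun d p => d.insert p.1 p.2) PySem.Dict.empty).items

-- ===== PRECONDITION & SPEC =====
def Spec_titleDict (song_list : List (String × String)) (out : List (String × List String)) : Prop := out = titleDict_alt song_list
instance (song_list : List (String × String)) (out : List (String × List String)) : Decidable (Spec_titleDict song_list out) := by unfold Spec_titleDict; infer_instance

-- ===== CLAIM (what is proved, stated in full; the proofs are below) =====
def Claim_equal_titleDict : Prop := ∀ (song_list : List (String × String)), Dom_titleDict song_list → Spec_titleDict song_list (titleDict song_list)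

-- ===== LEMMAS AND PROOFS =====

-- The runs of l with a pending run (artist a, titles ts) already inserted in the dict:
-- if l continues artist a, the pending run is extended (and will overwrite a's entry).
def extRuns (a : String) (ts : List String) (l : List (String × String)) :
    List (String × List String) :=
  if (spanArtist a l).1 = [] then groupRuns l
  else (a, ts ++ (spanArtist a l).1) :: groupRuns (spanArtist a l).2

theorem spanArtist_fst_nil (a : String) (l : List (String × String))
    (h : (spanArtist a l).1 = []) : (spanArtist a l).2 = l := by
  cases l with
  | nil => simp [spanArtist]
  | cons hd tl =>
    obtain ⟨t, b⟩ := hd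
    by_cases hb : b == a
    · simp [spanArtist, hb] at h
    · simp [spanArtist, hb]

theorem extRuns_nil (a : String) (l : List (String × String)) :
    extRuns a [] l = groupRuns l := by
  cases l with
  | nil => simp [extRuns, spanArtist]
  | cons hd tl =>
    obtain ⟨t, b⟩ := hd
    by_cases hb : b == a
    · have hba : b = a := by simpa using hb
      subst hba
      simp [extRuns, spanArtist, groupRuns]
    · simp [extRuns, spanArtist, hb]

theorem titleDictLoop_eq_foldl (l : List (String × String)) :
    ∀ (a : String) (ts : List String) (d : PySem.Dict String (List String)),
      titleDictLoop d ts a l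
        = (extRuns a ts l).foldl (fun d p => d.insert p.1 p.2) d := by
  induction l with
  | nil => intro a ts d; simp [titleDictLoop, extRuns, spanArtist, groupRuns]
  | cons hd rest ih =>
    intro a ts d
    obtain ⟨t, b⟩ := hd
    by_cases hb : b == a
    · -- run continues: titles ++= [t], dict[a] overwritten
      have hba : b = a := by simpa using hb
      subst hba
      rw [show titleDictLoop d ts b ((t, b) :: rest)
            = titleDictLoop (d.insert b (ts ++ [t])) (ts ++ [t]) b rest by
          simp [titleDictLoop]]
      rw [ih b (ts ++ [t]) (d.insert b (ts ++ [t]))]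
      by_cases hs : (spanArtist b rest).1 = []
      · have hr := spanArtist_fst_nil b rest hs
        simp [extRuns, spanArtist, hs, hr]
      · simp only [extRuns, spanArtist, beq_self_eq_true, if_true, hs, if_neg]
        simp only [List.cons_ne_self, if_false, List.foldl_cons,
          PySem.Dict.insert_insert_self]
        simp [hs]
    · -- new run starts at artist b
      have hab : (a == b) = false := by
        simp only [beq_eq_false_iff_ne, ne_eq]
        intro h; exact hb (by simp [h])
      rw [show titleDictLoop d ts a ((t, b) :: rest)
            = titleDictLoop (d.insert b [t]) [t] b rest by
          simp [titleDictLoop, hab]]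
      rw [ih b [t] (d.insert b [t])]
      by_cases hs : (spanArtist b rest).1 = []
      · have hr := spanArtist_fst_nil b rest hs
        simp [extRuns, spanArtist, hb, hs, hr, groupRuns]
      · simp only [extRuns, spanArtist, hb, if_false, hs, if_neg]
        simp only [groupRuns, List.foldl_cons, PySem.Dict.insert_insert_self]
        simp [hs, groupRuns]

-- ===== VERDICT (by name: the statement is the Claim_ definition above) =====
theorem titleDict_spec : Claim_equal_titleDict := by
  intro l _
  unfold Spec_titleDict titleDict titleDict_alt
  rw [titleDictLoop_eq_foldl l "" [] PySem.Dict.empty, extRuns_nil]
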